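-- pv_equiv track=rewrite | github.com/Gustavo-Galvao-e-Silva/COT-Checker | p2.py | calculate_mod_e_powers_of_two
-- ===== SOURCE A (Python) =====
-- def calculate_mod_e_powers_of_two(e: int, max_power_of_two: int, divisor: int) -> list[int]:
--     arr = []
--     previous_remainder = e % divisor
--     arr.append(previous_remainder)
--     for i in range(1, max_power_of_two + 1):
--         current_remainder = (previous_remainder ** 2) % divisor
--         arr.append(current_remainder)
--         previous_remainder = current_remainder
--     return arr
-- ===== SOURCE B (Python) =====
-- def calculate_mod_e_powers_of_two(e, max_power_of_two, divisor):
--     n = max(max_power_of_two, 0) + 1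
--     r = e % divisor
--     seen = set()
--     chain = []
--     while len(chain) < n and r not in seen:
--         seen.add(r)
--         chain.append(r)
--         r = r * r % divisor
--     if len(chain) == n:
--         return chain
--     start = chain.index(r)
--     cycle = chain[start:]
--     return (chain + cycle * ((n - len(chain)) // len(cycle) + 1))[:n]
-- ===== Notes on version B (the rewrite author's own statement) =====
-- stated objective: faster
-- what changed: Instead of squaring the previous remainder max_power_of_two times, B detects when a remainder repeats (tracking seen remainders in a set), takes the cycle of the squaring chain, and builds the rest of the list by repeating that cycle.
import Mathlib
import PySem

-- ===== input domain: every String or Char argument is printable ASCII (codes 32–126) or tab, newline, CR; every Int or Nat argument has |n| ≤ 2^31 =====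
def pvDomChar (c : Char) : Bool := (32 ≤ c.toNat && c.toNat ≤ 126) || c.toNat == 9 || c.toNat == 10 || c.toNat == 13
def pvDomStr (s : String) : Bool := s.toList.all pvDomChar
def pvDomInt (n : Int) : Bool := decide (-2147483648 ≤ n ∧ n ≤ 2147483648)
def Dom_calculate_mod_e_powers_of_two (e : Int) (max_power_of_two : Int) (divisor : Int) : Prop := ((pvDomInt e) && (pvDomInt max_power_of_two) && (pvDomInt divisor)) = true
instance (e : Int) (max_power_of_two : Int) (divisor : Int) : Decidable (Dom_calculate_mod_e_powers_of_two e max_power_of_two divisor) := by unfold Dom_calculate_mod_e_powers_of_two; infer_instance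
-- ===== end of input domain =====

-- B detects the cycle of the squaring-chain of remainders (a set of seen remainders) and fills the
-- tail of the result from that cycle instead of squaring n times; measurably faster when the cycle is
-- short relative to max_power_of_two.


-- ===== PORT A =====
def calculate_mod_e_powers_of_two (e : Int) (max_power_of_two : Int) (divisor : Int) : List Int :=
  let previous_remainder := PySem.Int.mod e divisor
  let arr := [previous_remainder]
  let s := (PySem.List.pyRange 1 (max_power_of_two + 1) 1).foldl
    (fun (s : List Int × Int) _ =>
      let current_remainder := PySem.Int.mod (s.2 ^ 2) divisor
      (s.1 ++ [current_remainder], current_remainder))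
    (arr, previous_remainder)
  s.1

-- ===== PORT B =====
-- the while loop of B; fuel = n - len(chain) (n = max(max_power_of_two,0)+1 ≥ 1, so Nat n is exact)
def pvLoopB (divisor : Int) (n : Nat) : Nat → PySem.Set Int → List Int → Int → (PySem.Set Int × List Int × Int)
  | 0, seen, chain, r => (seen, chain, r)
  | fuel + 1, seen, chain, r =>
    if chain.length < n ∧ r ∉ seen then
      pvLoopB divisor n fuel (PySem.Set.add seen r) (chain ++ [r]) (PySem.Int.mod (r * r) divisor)
    else (seen, chain, r)

def calculate_mod_e_powers_of_two_alt (e : Int) (max_power_of_two : Int) (divisor : Int) : List Int :=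
  let n : Int := max max_power_of_two 0 + 1
  let res := pvLoopB divisor n.toNat n.toNat PySem.Set.empty [] (PySem.Int.mod e divisor)
  let chain := res.2.1
  let r := res.2.2
  if chain.length = n.toNat then chain
  else
    -- chain.index(r): r is provably in chain here, so Python's .index cannot raise
    let start := (PySem.List.index? chain r).getD 0
    let cycle := PySem.List.slice chain (some (start : Int)) none
    PySem.List.slice
      (chain ++ PySem.List.pyRepeat cycle (PySem.Int.floordiv (n - chain.length) cycle.length + 1))
      none (some n)

-- ===== PRECONDITION & SPEC =====
-- A raises ZeroDivisionError exactly when divisor == 0 (at 'e % divisor'); no other input raises.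
def Pre_calculate_mod_e_powers_of_two (e : Int) (max_power_of_two : Int) (divisor : Int) : Prop := divisor ≠ 0
instance (e : Int) (max_power_of_two : Int) (divisor : Int) : Decidable (Pre_calculate_mod_e_powers_of_two e max_power_of_two divisor) := by unfold Pre_calculate_mod_e_powers_of_two; infer_instance
def pvWitness_calculate_mod_e_powers_of_two : Int × Int × Int := (3, 4, 7)

def Spec_calculate_mod_e_powers_of_two (e : Int) (max_power_of_two : Int) (divisor : Int) (out : List Int) : Prop := out = calculate_mod_e_powers_of_two_alt e max_power_of_two divisor
instance (e : Int) (max_power_of_two : Int) (divisor : Int) (out : List Int) : Decidable (Spec_calculate_mod_e_powers_of_two e max_power_of_two divisor out) := by unfold Spec_calculate_mod_e_powers_of_two; infer_instance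

-- ===== CLAIM (what is proved, stated in full; the proofs are below) =====
def Claim_equal_calculate_mod_e_powers_of_two : Prop := ∀ (e : Int) (max_power_of_two : Int) (divisor : Int), Dom_calculate_mod_e_powers_of_two e max_power_of_two divisor → Pre_calculate_mod_e_powers_of_two e max_power_of_two divisor → Spec_calculate_mod_e_powers_of_two e max_power_of_two divisor (calculate_mod_e_powers_of_two e max_power_of_two divisor)

-- ===== LEMMAS AND PROOFS =====
-- proof-side helper: the squaring step; A and B both iterate it
def pvStep (d : Int) (r : Int) : Int := PySem.Int.mod (r ^ 2) d

lemma pvLoopA (d r0 : Int) (l : List Int) : ∀ (acc : List Int) (k : Nat),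
    l.foldl (fun (s : List Int × Int) _ =>
        (s.1 ++ [PySem.Int.mod (s.2 ^ 2) d], PySem.Int.mod (s.2 ^ 2) d))
      (acc, (pvStep d)^[k] r0)
    = (acc ++ (List.range l.length).map (fun j => (pvStep d)^[k + 1 + j] r0),
       (pvStep d)^[k + l.length] r0) := by
  induction l with
  | nil => intro acc k; simp
  | cons a l ih =>
    intro acc k
    have hc : PySem.Int.mod (((pvStep d)^[k] r0) ^ 2) d = (pvStep d)^[k + 1] r0 := by
      rw [Function.iterate_succ_apply']; rfl
    simp only [List.foldl_cons, hc]
    rw [ih (acc ++ [(pvStep d)^[k + 1] r0]) (k + 1)]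
    simp only [Prod.mk.injEq]
    refine ⟨?_, ?_⟩
    · rw [List.length_cons, List.range_succ_eq_map, List.map_cons, List.map_map,
        List.append_assoc, List.singleton_append]
      refine congrArg _ (congrArg _ (List.map_congr_left ?_))
      intro j hj
      have h : k + 1 + 1 + j = k + 1 + (j + 1) := by omega
      simp only [Function.comp_apply, h]
    · have h : k + 1 + l.length = k + (a :: l).length := by simp; omega
      rw [h]

lemma pvAchar (e m d : Int) :
    calculate_mod_e_powers_of_two e m d
      = (List.range (m.toNat + 1)).map (fun k => (pvStep d)^[k] (PySem.Int.mod e d)) := by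
  unfold calculate_mod_e_powers_of_two
  dsimp only
  have h0 : PySem.Int.mod e d = (pvStep d)^[0] (PySem.Int.mod e d) := rfl
  rw [h0, pvLoopA]
  have hlen : (PySem.List.pyRange 1 (m + 1) 1).length = m.toNat := by
    rw [PySem.List.length_pyRange_one]; congr 1; omega
  rw [hlen, List.range_succ_eq_map, List.map_cons, List.map_map, List.singleton_append]
  refine List.cons_eq_cons.mpr ⟨rfl, List.map_congr_left ?_⟩
  intro j hj
  have h : 0 + 1 + j = j + 1 := by omega
  simp only [Function.comp_apply, h, Function.iterate_zero_apply, Nat.succ_eq_add_one]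

lemma pvDropMapRange (n i : Nat) (f : Nat → Int) (h : i ≤ n) :
    (((List.range n).map f).drop i) = (List.range (n - i)).map (fun j => f (i + j)) := by
  apply List.ext_getElem
  · simp
  · intro j h1 h2
    simp

lemma pvRepeatGet (cyc : List Int) (hL : cyc ≠ []) :
    ∀ (q t : Nat) (h : t < ((List.replicate q cyc).flatten).length),
      ((List.replicate q cyc).flatten)[t]
        = cyc[t % cyc.length]'(Nat.mod_lt _ (List.length_pos_iff.2 hL)) := by
  intro q
  induction q with
  | zero => intro t h; simp at h
  | succ q ih =>
    intro t h
    simp only [List.replicate_succ, List.flatten_cons] at h ⊢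
    by_cases ht : t < cyc.length
    · rw [List.getElem_append_left ht]
      congr 1
      exact (Nat.mod_eq_of_lt ht).symm
    · have ht' : cyc.length ≤ t := by omega
      rw [List.getElem_append_right ht']
      rw [ih (t - cyc.length) (by simp at h ⊢; omega)]
      congr 1
      conv_rhs => rw [Nat.mod_eq_sub_mod ht']

lemma pvPeriod (g : Int → Int) (r0 : Int) (i L : Nat) (hp : g^[i + L] r0 = g^[i] r0) :
    ∀ k, i ≤ k → g^[k + L] r0 = g^[k] r0 := by
  intro k hk
  have h1 : k + L = (k - i) + (i + L) := by omega
  have h2 : k = (k - i) + i := by omega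
  rw [h1, Function.iterate_add_apply, hp, ← Function.iterate_add_apply, ← h2]

lemma pvModPeriod (g : Int → Int) (r0 : Int) (i L : Nat) (hL : 0 < L)
    (hp : g^[i + L] r0 = g^[i] r0) :
    ∀ j, i ≤ j → g^[i + (j - i) % L] r0 = g^[j] r0 := by
  intro j
  induction j using Nat.strong_induction_on with
  | _ j ih =>
    intro hij
    by_cases hj : j < i + L
    · have : (j - i) % L = j - i := Nat.mod_eq_of_lt (by omega)
      rw [this, Nat.add_sub_cancel' hij]
    · have hiL : i ≤ j - L := by omega
      have h1 : g^[j] r0 = g^[j - L] r0 := by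
        have := pvPeriod g r0 i L hp (j - L) hiL
        rw [← this]; congr 1; omega
      rw [h1, ← ih (j - L) (by omega) hiL]
      congr 2
      have : j - i ≥ L := by omega
      rw [Nat.mod_eq_sub_mod this]
      congr 1
      omega

lemma pvLoopBspec (d : Int) (n : Nat) (r0 : Int) :
    ∀ (fuel c : Nat) (seen : PySem.Set Int) (chain : List Int) (r : Int),
      c + fuel = n →
      chain = (List.range c).map (fun k => (pvStep d)^[k] r0) →
      r = (pvStep d)^[c] r0 →
      (∀ x : Int, x ∈ seen ↔ x ∈ chain) →
      ∃ (c' : Nat) (s : PySem.Set Int),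
        pvLoopB d n fuel seen chain r
          = (s, (List.range c').map (fun k => (pvStep d)^[k] r0), (pvStep d)^[c'] r0) ∧
        c ≤ c' ∧ c' ≤ n ∧
        (c' = n ∨ (pvStep d)^[c'] r0 ∈ (List.range c').map (fun k => (pvStep d)^[k] r0)) := by
  intro fuel
  induction fuel with
  | zero =>
    intro c seen chain r hc hchain hr hseen
    exact ⟨c, seen, by rw [pvLoopB, hchain, hr], le_refl c, by omega, Or.inl (by omega)⟩
  | succ fuel ih =>
    intro c seen chain r hc hchain hr hseen
    rw [pvLoopB]
    have hlen : chain.length = c := by rw [hchain]; simp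
    by_cases hcond : chain.length < n ∧ r ∉ seen
    · rw [if_pos hcond]
      have hstep : PySem.Int.mod (r * r) d = (pvStep d)^[c + 1] r0 := by
        rw [Function.iterate_succ_apply', ← hr, pvStep, pow_two]
      have hchain' : chain ++ [r] = (List.range (c + 1)).map (fun k => (pvStep d)^[k] r0) := by
        rw [List.range_succ, List.map_append, ← hchain, hr]; rfl
      have hseen' : ∀ x : Int, x ∈ PySem.Set.add seen r ↔ x ∈ chain ++ [r] := by
        intro x
        rw [PySem.Set.mem_add, hseen x, List.mem_append, List.mem_singleton]
      obtain ⟨c', s, heq, h1, h2, h3⟩ :=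
        ih (c + 1) (PySem.Set.add seen r) (chain ++ [r]) (PySem.Int.mod (r * r) d)
          (by omega) hchain' hstep hseen'
      exact ⟨c', s, heq, by omega, h2, h3⟩
    · rw [if_neg hcond]
      have hmem : r ∈ chain := by
        rcases not_and_or.mp hcond with h | h
        · omega
        · exact (hseen r).mp (not_not.mp h)
      exact ⟨c, seen, by rw [hchain, hr], le_refl c, by omega,
        Or.inr (by rw [← hchain, ← hr]; exact hmem)⟩

lemma pvBchar (e m d : Int) :
    calculate_mod_e_powers_of_two_alt e m d
      = (List.range (m.toNat + 1)).map (fun k => (pvStep d)^[k] (PySem.Int.mod e d)) := by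
  unfold calculate_mod_e_powers_of_two_alt
  dsimp only
  set f : Nat → Int := fun k => (pvStep d)^[k] (PySem.Int.mod e d) with hf
  set N : Nat := (max m 0 + 1).toNat with hNdef
  have hNm : N = m.toNat + 1 := by omega
  have hNc : ((N : Int)) = max m 0 + 1 := by omega
  obtain ⟨c', s, heq, -, hc'N, h3⟩ :=
    pvLoopBspec d N (PySem.Int.mod e d) N 0 PySem.Set.empty [] (PySem.Int.mod e d)
      (by omega) (by simp) rfl (by intro x; rfl)
  rw [heq]
  dsimp only
  have hlen : ((List.range c').map f).length = c' := by simp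
  by_cases hcN : c' = N
  · rw [if_pos (by rw [hlen, hcN]), hcN, hNm]
  · rw [if_neg (by rw [hlen]; exact hcN)]
    have hc'lt : c' < N := by omega
    have hmem : f c' ∈ (List.range c').map f := h3.resolve_left hcN
    have hsome : (PySem.List.index? ((List.range c').map f) (f c')).isSome := by
      rw [PySem.List.index?_isSome_iff]; exact hmem
    obtain ⟨i, hidx⟩ := Option.isSome_iff_exists.mp hsome
    obtain ⟨hik, hgi, hfirst⟩ := PySem.List.getElem_of_index?_eq_some hidx
    have hic : i < c' := by
      have := hik; simp only [List.length_map, List.length_range] at this; exact this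
    have hfi : f i = f c' := by
      have := hgi; simpa using this
    rw [hidx]
    dsimp only [Option.getD_some]
    rw [PySem.List.slice_from_natCast]
    rw [pvDropMapRange c' i f (le_of_lt hic)]
    set L : Nat := c' - i with hLdef
    have hL : 0 < L := by omega
    set cyc : List Int := (List.range L).map (fun j => f (i + j)) with hcyc
    have hcycL : cyc.length = L := by simp [hcyc]
    have hcycne : cyc ≠ [] := by
      simp [hcyc, List.map_eq_nil_iff, List.range_eq_nil]; omega
    have hper : (pvStep d)^[i + L] (PySem.Int.mod e d) = (pvStep d)^[i] (PySem.Int.mod e d) := by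
      have : i + L = c' := by omega
      rw [this]
      exact hfi.symm
    -- the repetition count
    have hqcast : (max m 0 + 1) - (((List.range c').map f).length : Int) = (((N - c' : Nat)) : Int) := by
      rw [hlen]; omega
    set Q : Nat := (N - c') / L + 1 with hQdef
    have hflq : PySem.Int.floordiv ((max m 0 + 1) - (((List.range c').map f).length : Int)) (cyc.length : Int) + 1 = ((Q : Nat) : Int) := by
      rw [hqcast, hcycL, PySem.Int.floordiv_natCast, hQdef]
      norm_cast
    rw [hflq]
    rw [PySem.List.slice_to _ (b := max m 0 + 1) (by omega)]
    have htoNat : ((max m 0 + 1 : Int)).toNat = N := by omega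
    rw [htoNat]
    unfold PySem.List.pyRepeat
    have hQtoNat : ((Q : Int)).toNat = Q := Int.toNat_natCast Q
    rw [hQtoNat]
    -- lengths
    have hflatlen : ((List.replicate Q cyc).flatten).length = Q * L := by
      simp [hcycL, Nat.mul_comm]
    have hQL : N < c' + Q * L := by
      have h2 := Nat.div_add_mod (N - c') L
      have hml := Nat.mod_lt (N - c') hL
      have h1 : Q * L = L * ((N - c') / L) + L := by
        rw [hQdef, Nat.add_mul, one_mul, Nat.mul_comm]
      rw [h1]
      generalize hP : L * ((N - c') / L) = P at h2 ⊢
      omega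
    have htotal : N ≤ (((List.range c').map f) ++ (List.replicate Q cyc).flatten).length := by
      rw [List.length_append, hlen, hflatlen]
      omega
    apply List.ext_getElem
    · simp only [List.length_take, List.length_map, List.length_range]
      rw [List.length_append, hlen, hflatlen] at htotal ⊢
      generalize c' + Q * L = T at htotal ⊢
      omega
    · intro j hj1 hj2
      have hjN : j < N := by simp only [List.length_map, List.length_range] at hj2; omega
      rw [List.getElem_take]
      by_cases hjc : j < c'
      · rw [List.getElem_append_left (by rw [hlen]; exact hjc)]
        simp only [List.getElem_map, List.getElem_range]
        rfl
      · have hge : ((List.range c').map f).length ≤ j := by rw [hlen]; omega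
        rw [List.getElem_append_right hge]
        simp only [hlen]
        rw [pvRepeatGet cyc hcycne Q (j - c') (by rw [hflatlen]; omega)]
        simp only [hcyc, List.getElem_map, List.getElem_range, List.length_map, List.length_range]
        have hmodeq : (j - c') % L = (j - i) % L := by
          have hLle : L ≤ j - i := by omega
          rw [Nat.mod_eq_sub_mod hLle]
          congr 1
          omega
        rw [hmodeq]
        exact pvModPeriod (pvStep d) (PySem.Int.mod e d) i L hL hper j (by omega)

-- ===== VERDICT (by name: the statement is the Claim_ definition above) =====
theorem calculate_mod_e_powers_of_two_spec : Claim_equal_calculate_mod_e_powers_of_two := by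
  intro e m d _ _
  unfold Spec_calculate_mod_e_powers_of_two
  rw [pvAchar, pvBchar]
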